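-- pv_equiv track=rewrite | github.com/ames0k0/not_deleted_code | AdventOfCode/2021/Python/13/transparent_origami_1.py | transparent_x
-- ===== SOURCE A (Python) =====
-- def transparent_x(coords, fold_x):
--   left = []
--   right = []
--   for (x, y) in coords:
--     if (x < fold_x):
--       left.append((x, y))
--     else:
--       right.append((x, y))
--   left = sorted(left, key=lambda x: x[0])
--   right = sorted(right, key=lambda x: x[0])
--   max_x = left[-1][0]
--   for (x, y) in right:
--     x = abs(x - max_x)
--     if (not x) and (not y):
--       continue
--     left.append((x, y))
--   return left
-- ===== SOURCE B (Python) =====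
-- def transparent_x(coords, fold_x):
--     # max x strictly left of the fold (raises on an empty left half, as A's left[-1] does)
--     max_x = max(x for x, y in coords if x < fold_x)
--     # ONE sort with a composite key: left points first (by x), then right points (by x)
--     ordered = sorted(coords, key=lambda p: (0 if p[0] < fold_x else 1, p[0]))
--     # every right point has x >= fold_x > max_x, so its reflection x - max_x is a
--     # positive integer: the fold's "(0, 0) skip" can never apply and abs is unneeded
--     return [(x, y) if x < fold_x else (x - max_x, y) for x, y in ordered]
-- ===== Notes on version B (the rewrite author's own statement) =====
-- stated objective: alternative
-- what changed: B drops A's partition+two-sorts+filtered-append pipeline: it computes max_x directly as the maximum x among points left of the fold (a scan, not left[-1] of a sort), does ONE sort with a composite key (side, x) that lays out left-then-right, and maps reflection over it with no filter at all, since the reflected x is provably always positive so A's (0,0)-skip is dead code.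
import Mathlib
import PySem

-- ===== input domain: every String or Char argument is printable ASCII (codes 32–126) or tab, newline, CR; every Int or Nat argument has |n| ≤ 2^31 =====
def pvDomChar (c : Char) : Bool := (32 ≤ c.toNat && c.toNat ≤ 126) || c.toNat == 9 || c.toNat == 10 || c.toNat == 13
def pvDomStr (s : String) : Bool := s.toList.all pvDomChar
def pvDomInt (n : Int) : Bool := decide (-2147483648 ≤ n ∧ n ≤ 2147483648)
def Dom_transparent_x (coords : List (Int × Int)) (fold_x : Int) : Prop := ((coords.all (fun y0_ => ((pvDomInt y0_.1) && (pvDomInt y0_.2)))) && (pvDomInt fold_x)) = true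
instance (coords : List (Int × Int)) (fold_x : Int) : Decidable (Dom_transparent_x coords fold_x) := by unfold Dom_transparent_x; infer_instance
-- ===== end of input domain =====

-- B replaces A's partition/two-sorts/filtered-append by a direct max scan for max_x, ONE
-- sort with a composite (side, x) key, and a filter-free reflection map (alternative decomposition).


-- ===== PORT A =====
def transparent_x (coords : List (Int × Int)) (fold_x : Int) : List (Int × Int) :=
  -- partition loop: left.append / right.append
  let lr := coords.foldl
    (fun (acc : List (Int × Int) × List (Int × Int)) p =>
      if p.1 < fold_x then (acc.1 ++ [p], acc.2) else (acc.1, acc.2 ++ [p])) ([], [])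
  let left := PySem.List.sorted lr.1 (fun q => q.1)
  let right := PySem.List.sorted lr.2 (fun q => q.1)
  match PySem.List.pyGet? left (-1) with   -- left[-1]; none = IndexError, excluded by Pre_
  | none => []
  | some m =>
    let max_x := m.1
    right.foldl
      (fun acc p =>
        if |p.1 - max_x| = 0 ∧ p.2 = 0 then acc
        else acc ++ [(|p.1 - max_x|, p.2)]) left

-- ===== PORT B =====
def transparent_x_alt (coords : List (Int × Int)) (fold_x : Int) : List (Int × Int) :=
  -- max(x for x, y in coords if x < fold_x); none = ValueError, excluded by Pre_
  match PySem.List.max?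
      ((coords.filter (fun p => decide (p.1 < fold_x))).map (fun p => p.1)) (fun x => x) with
  | none => []
  | some max_x =>
    -- sorted(coords, key=lambda p: (0 if p[0] < fold_x else 1, p[0]))
    let ordered := PySem.List.sorted2 coords
      (fun p => if p.1 < fold_x then (0 : Int) else 1) (fun p => p.1)
    ordered.map (fun p => if p.1 < fold_x then p else (p.1 - max_x, p.2))

-- ===== PRECONDITION & SPEC =====
-- Pre_: some point lies strictly left of the fold; otherwise left[-1] (A, IndexError) /
-- max() of an empty generator (B, ValueError) raises in Python.
def Pre_transparent_x (coords : List (Int × Int)) (fold_x : Int) : Prop :=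
  (coords.any (fun p => decide (p.1 < fold_x))) = true
instance (coords : List (Int × Int)) (fold_x : Int) : Decidable (Pre_transparent_x coords fold_x) := by unfold Pre_transparent_x; infer_instance
def pvWitness_transparent_x : (List (Int × Int)) × Int := ([(0, 0), (2, 1)], 1)

def Spec_transparent_x (coords : List (Int × Int)) (fold_x : Int) (out : List (Int × Int)) : Prop := out = transparent_x_alt coords fold_x
instance (coords : List (Int × Int)) (fold_x : Int) (out : List (Int × Int)) : Decidable (Spec_transparent_x coords fold_x out) := by unfold Spec_transparent_x; infer_instance

-- ===== CLAIM (what is proved, stated in full; the proofs are below) =====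
def Claim_equal_transparent_x : Prop := ∀ (coords : List (Int × Int)) (fold_x : Int), Dom_transparent_x coords fold_x → Pre_transparent_x coords fold_x → Spec_transparent_x coords fold_x (transparent_x coords fold_x)

-- ===== LEMMAS AND PROOFS =====

-- A's partition loop is (filter p, filter ¬p)
theorem pv_partition_eq (coords : List (Int × Int)) (fold_x : Int) :
    coords.foldl
      (fun (acc : List (Int × Int) × List (Int × Int)) p =>
        if p.1 < fold_x then (acc.1 ++ [p], acc.2) else (acc.1, acc.2 ++ [p])) ([], []) =
    (coords.filter (fun p => decide (p.1 < fold_x)),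
     coords.filter (fun p => !decide (p.1 < fold_x))) := by
  suffices h : ∀ (a b : List (Int × Int)),
      coords.foldl
        (fun (acc : List (Int × Int) × List (Int × Int)) p =>
          if p.1 < fold_x then (acc.1 ++ [p], acc.2) else (acc.1, acc.2 ++ [p])) (a, b) =
      (a ++ coords.filter (fun p => decide (p.1 < fold_x)),
       b ++ coords.filter (fun p => !decide (p.1 < fold_x))) by
    simpa using h [] []
  induction coords with
  | nil => simp
  | cons x t ih =>
    intro a b
    by_cases hx : x.1 < fold_x <;> simp [hx, ih]

-- B's composite comparator (from sorted2 with keys (side, x))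
def pvLt2 (fold_x : Int) (a b : Int × Int) : Bool :=
  decide ((if a.1 < fold_x then (0 : Int) else 1) < (if b.1 < fold_x then (0 : Int) else 1)) ||
  (!decide ((if b.1 < fold_x then (0 : Int) else 1) < (if a.1 < fold_x then (0 : Int) else 1)) &&
    decide (a.1 < b.1))

-- on an all-right list the composite comparator degenerates to the x-comparator
theorem pv_insertBy2_right (fold_x : Int) (x : Int × Int) (hx : ¬ x.1 < fold_x) :
    ∀ (l2 : List (Int × Int)), (∀ a ∈ l2, ¬ a.1 < fold_x) →
    PySem.List.insertBy (pvLt2 fold_x) x l2 =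
      PySem.List.insertBy (fun a b : Int × Int => decide (a.1 < b.1)) x l2 := by
  intro l2
  induction l2 with
  | nil => simp [PySem.List.insertBy]
  | cons b t ih =>
    intro h2
    have hb : ¬ b.1 < fold_x := h2 b (by simp)
    have iht := ih (fun a ha => h2 a (by simp [ha]))
    cases hxb : decide (x.1 < b.1) <;>
      simp [PySem.List.insertBy, pvLt2, hx, hb, hxb, iht]

-- inserting with the composite comparator into a split list l1 ++ l2
theorem pv_insertBy2_split (fold_x : Int) (x : Int × Int) :
    ∀ (l1 l2 : List (Int × Int)), (∀ a ∈ l1, a.1 < fold_x) → (∀ a ∈ l2, ¬ a.1 < fold_x) →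
    PySem.List.insertBy (pvLt2 fold_x) x (l1 ++ l2) =
      if x.1 < fold_x then
        PySem.List.insertBy (fun a b : Int × Int => decide (a.1 < b.1)) x l1 ++ l2
      else
        l1 ++ PySem.List.insertBy (fun a b : Int × Int => decide (a.1 < b.1)) x l2 := by
  intro l1
  induction l1 with
  | nil =>
    intro l2 _ h2
    by_cases hx : x.1 < fold_x
    · cases l2 with
      | nil => simp [PySem.List.insertBy, hx]
      | cons b t =>
        have hb : ¬ b.1 < fold_x := h2 b (by simp)
        simp [PySem.List.insertBy, pvLt2, hx, hb]
    · simp only [List.nil_append, if_neg hx]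
      exact pv_insertBy2_right fold_x x hx l2 h2
  | cons a t ih =>
    intro l2 h1 h2
    have ha : a.1 < fold_x := h1 a (by simp)
    have iht := ih l2 (fun b hb => h1 b (by simp [hb])) h2
    by_cases hx : x.1 < fold_x
    · simp only [if_pos hx] at iht ⊢
      cases hxa : decide (x.1 < a.1) <;>
        simp [PySem.List.insertBy, pvLt2, hx, ha, hxa, iht]
    · simp only [if_neg hx] at iht ⊢
      simp [PySem.List.insertBy, pvLt2, hx, ha, iht]

-- the composite-key sort is: sorted left half ++ sorted right half (each by x)
theorem pv_sorted2_split (coords : List (Int × Int)) (fold_x : Int) :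
    PySem.List.sorted2 coords
      (fun p => if p.1 < fold_x then (0 : Int) else 1) (fun p => p.1) =
      PySem.List.sorted (coords.filter (fun p => decide (p.1 < fold_x))) (fun q : Int × Int => q.1) ++
      PySem.List.sorted (coords.filter (fun p => !decide (p.1 < fold_x))) (fun q : Int × Int => q.1) := by
  simp only [PySem.List.sorted_eq_foldl_insertBy]
  show coords.foldl (fun acc x => PySem.List.insertBy (pvLt2 fold_x) x acc) [] = _
  suffices h : ∀ (l1 l2 : List (Int × Int)), (∀ a ∈ l1, a.1 < fold_x) → (∀ a ∈ l2, ¬ a.1 < fold_x) →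
      coords.foldl (fun acc x => PySem.List.insertBy (pvLt2 fold_x) x acc) (l1 ++ l2) =
      (coords.filter (fun p => decide (p.1 < fold_x))).foldl
        (fun acc x => PySem.List.insertBy (fun a b => decide (a.1 < b.1)) x acc) l1 ++
      (coords.filter (fun p => !decide (p.1 < fold_x))).foldl
        (fun acc x => PySem.List.insertBy (fun a b => decide (a.1 < b.1)) x acc) l2 by
    simpa using h [] [] (by simp) (by simp)
  induction coords with
  | nil => intro l1 l2 _ _; simp
  | cons x t ih =>
    intro l1 l2 h1 h2
    rw [List.foldl_cons, pv_insertBy2_split fold_x x l1 l2 h1 h2]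
    by_cases hx : x.1 < fold_x
    · rw [if_pos hx]
      have h1' : ∀ a ∈ PySem.List.insertBy (fun a b : Int × Int => decide (a.1 < b.1)) x l1,
          a.1 < fold_x := by
        intro a ha
        rcases (PySem.List.mem_insertBy _ _ _ _).1 ha with h | h
        · exact h ▸ hx
        · exact h1 a h
      rw [ih _ _ h1' h2]
      simp [hx]
    · rw [if_neg hx]
      have h2' : ∀ a ∈ PySem.List.insertBy (fun a b : Int × Int => decide (a.1 < b.1)) x l2,
          ¬ a.1 < fold_x := by
        intro a ha
        rcases (PySem.List.mem_insertBy _ _ _ _).1 ha with h | h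
        · exact h ▸ hx
        · exact h2 a h
      rw [ih _ _ h1 h2']
      simp [hx]

-- the last element of a key-sorted list carries the maximal key
theorem pv_getLast_max {l : List (Int × Int)} {m : Int × Int}
    (hp : l.Pairwise (fun a b : Int × Int => a.1 ≤ b.1)) (hl : l.getLast? = some m) :
    ∀ y ∈ l, y.1 ≤ m.1 := by
  induction l with
  | nil => simp at hl
  | cons a t ih =>
    cases t with
    | nil =>
      simp at hl
      intro y hy
      simp at hy
      simp [hy, hl]
    | cons b t' =>
      rw [List.getLast?_cons_cons] at hl
      have hm : m ∈ b :: t' := List.mem_of_getLast? hl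
      intro y hy
      rcases List.mem_cons.1 hy with rfl | hy'
      · exact le_trans (List.rel_of_pairwise_cons hp hm) le_rfl
      · exact ih (List.pairwise_cons.1 hp).2 hl y hy'

-- ===== VERDICT (by name: the statement is the Claim_ definition above) =====
theorem transparent_x_spec : Claim_equal_transparent_x := by
  intro coords fold_x _ hpre
  unfold Spec_transparent_x transparent_x transparent_x_alt
  simp only [pv_partition_eq, pv_sorted2_split coords fold_x]
  set left := coords.filter (fun p => decide (p.1 < fold_x)) with hleftdef
  set right := coords.filter (fun p => !decide (p.1 < fold_x)) with hrightdef
  set leftS := PySem.List.sorted left (fun q : Int × Int => q.1) with hls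
  set rightS := PySem.List.sorted right (fun q : Int × Int => q.1) with hrs
  -- Pre_ gives a nonempty left half
  have hleft_ne : left ≠ [] := by
    unfold Pre_transparent_x at hpre
    rcases List.any_eq_true.1 hpre with ⟨p, hp, hplt⟩
    intro hnil
    have hpl : p ∈ left := by rw [hleftdef]; exact List.mem_filter.2 ⟨hp, hplt⟩
    rw [hnil] at hpl
    simp at hpl
  have hlsne : leftS ≠ [] := by
    rw [hls]; simpa [PySem.List.sorted_eq_nil_iff] using hleft_ne
  -- A's left[-1]
  obtain ⟨m, hm⟩ : ∃ m, leftS.getLast? = some m := by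
    cases hgl : leftS.getLast? with
    | none => exact absurd (List.getLast?_eq_none_iff.1 hgl) hlsne
    | some m => exact ⟨m, rfl⟩
  -- B's max
  obtain ⟨mx, hmx⟩ : ∃ mx, PySem.List.max? (left.map (fun p => p.1)) (fun x => x) = some mx := by
    cases hgm : PySem.List.max? (left.map (fun p => p.1)) (fun x => x) with
    | none =>
      exact absurd ((PySem.List.max?_eq_none_iff _ _).1 hgm) (by simp [hleft_ne])
    | some mx => exact ⟨mx, rfl⟩
  -- the two maxima agree
  have hm_mem : m ∈ left := by
    have : m ∈ leftS := List.mem_of_getLast? hm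
    exact (PySem.List.mem_sorted _ _ _ _).1 this
  have hmx_mem : ∃ p ∈ left, p.1 = mx := by
    have := PySem.List.max?_mem hmx
    simpa using this
  have hmax_eq : mx = m.1 := by
    have h1 : m.1 ≤ mx := PySem.List.max?_isMax hmx m.1 (List.mem_map.2 ⟨m, hm_mem, rfl⟩)
    rcases hmx_mem with ⟨p, hp, hpx⟩
    have hpS : p ∈ leftS := (PySem.List.mem_sorted _ _ _ _).2 hp
    have h2 : p.1 ≤ m.1 :=
      pv_getLast_max (PySem.List.sorted_pairwise left (fun q : Int × Int => q.1)) hm p hpS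
    omega
  -- facts about members: left of the fold below, right of it above
  have hm_lt : m.1 < fold_x := by simpa using (List.mem_filter.1 hm_mem).2
  have hright_ge : ∀ p ∈ rightS, ¬ p.1 < fold_x := by
    intro p hp
    have := (List.mem_filter.1 ((PySem.List.mem_sorted _ _ _ _).1 hp)).2
    simpa using this
  have hleft_lt : ∀ p ∈ leftS, p.1 < fold_x := by
    intro p hp
    simpa using (List.mem_filter.1 ((PySem.List.mem_sorted _ _ _ _).1 hp)).2
  rw [PySem.List.pyGet?_neg_one, hm, hmx]
  dsimp only
  -- A's append loop = append of the reflected map (the skip branch is dead)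
  have hA : rightS.foldl
      (fun acc p =>
        if |p.1 - m.1| = 0 ∧ p.2 = 0 then acc
        else acc ++ [(|p.1 - m.1|, p.2)]) leftS =
      leftS ++ rightS.map (fun p => (p.1 - m.1, p.2)) := by
    rw [PySem.List.foldl_congr_mem rightS _
      (fun acc p => acc ++ [(p.1 - m.1, p.2)]) leftS ?_]
    · exact PySem.List.foldl_append_singleton_eq_map _ _ _
    · intro acc p hp
      have hge : ¬ p.1 < fold_x := hright_ge p hp
      have hpos : (0 : Int) < p.1 - m.1 := by omega
      simp [abs_of_pos hpos, show p.1 - m.1 ≠ 0 by omega]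
  rw [hA, List.map_append]
  congr 1
  · -- left half maps to itself
    rw [show (leftS.map (fun p => if p.1 < fold_x then p else (p.1 - mx, p.2))) =
        leftS.map id from List.map_congr_left (fun p hp => by simp [hleft_lt p hp])]
    simp
  · -- right half maps to the reflections
    refine (List.map_congr_left ?_).symm
    intro p hp
    simp [hright_ge p hp, hmax_eq]
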